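-- pv_equiv track=rewrite | github.com/RDNordic/ai-championship-warroom | src/grocerybot/planner.py | _consume_needed
-- ===== SOURCE A (Python) =====
-- def _consume_needed(
--     needed: list[str],
--     picked: tuple[str, ...],
-- ) -> tuple[int, list[str], list[str]]:
--     remaining = list(needed)
--     excess: list[str] = []
--     matched = 0
--     for item in picked:
--         if item in remaining:
--             remaining.remove(item)
--             matched += 1
--         else:
--             excess.append(item)
--     return matched, remaining, excess
-- ===== SOURCE B (Python) =====
-- def _consume_needed(
--     needed: list[str],
--     picked: tuple[str, ...],
-- ) -> tuple[int, list[str], list[str]]: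
--     cnt: dict[str, int] = {}
--     for item in needed:
--         cnt[item] = cnt.get(item, 0) + 1
--     matched = 0
--     excess: list[str] = []
--     consumed: dict[str, int] = {}
--     for item in picked:
--         if cnt.get(item, 0) > 0:
--             cnt[item] = cnt.get(item, 0) - 1
--             consumed[item] = consumed.get(item, 0) + 1
--             matched += 1
--         else:
--             excess.append(item)
--     remaining: list[str] = []
--     for item in needed:
--         if consumed.get(item, 0) > 0:
--             consumed[item] = consumed.get(item, 0) - 1
--         else:
--             remaining.append(item)
--     return matched, remaining, excess
-- ===== Notes on version B (the rewrite author's own statement) =====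
-- stated objective: faster
-- what changed: Replaces the per-pick linear membership test and list.remove scan with a counter of needed items: one pass over picked classifies matches/excess, and one pass over needed rebuilds remaining by skipping the first consumed[item] occurrences.
import Mathlib
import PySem

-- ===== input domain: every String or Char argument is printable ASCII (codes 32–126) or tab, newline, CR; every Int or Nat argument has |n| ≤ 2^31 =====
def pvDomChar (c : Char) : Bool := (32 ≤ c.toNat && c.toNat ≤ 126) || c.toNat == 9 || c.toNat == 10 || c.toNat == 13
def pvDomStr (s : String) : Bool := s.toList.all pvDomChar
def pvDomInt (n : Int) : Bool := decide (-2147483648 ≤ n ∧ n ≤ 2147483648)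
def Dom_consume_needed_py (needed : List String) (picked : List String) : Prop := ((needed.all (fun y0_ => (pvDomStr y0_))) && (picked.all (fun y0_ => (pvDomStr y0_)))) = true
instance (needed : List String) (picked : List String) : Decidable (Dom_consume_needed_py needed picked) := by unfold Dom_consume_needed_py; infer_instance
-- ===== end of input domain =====

-- B replaces A's per-pick linear membership test and list-remove scan with a counter of needed
-- items (one pass over picked, then a skip-first-k rebuild of remaining); objective: faster.


-- ===== PORT A =====
-- one step of A's loop over picked; state = (remaining, excess, matched)
def aStep (st : List String × List String × Int) (item : String) : List String × List String × Int :=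
  if item ∈ st.1 then ((PySem.List.remove? st.1 item).getD st.1, st.2.1, st.2.2 + 1)
  else (st.1, st.2.1 ++ [item], st.2.2)

def consume_needed_py (needed : List String) (picked : List String) : Int × List String × List String :=
  let st := picked.foldl aStep (needed, [], 0)
  (st.2.2, st.1, st.2.1)

-- ===== PORT B =====
-- one step of B's loop over picked; state = (cnt, consumed, matched, excess)
def bStep (st : PySem.Dict String Int × PySem.Dict String Int × Int × List String) (item : String) :
    PySem.Dict String Int × PySem.Dict String Int × Int × List String :=
  if st.1.getD item 0 > 0 then
    (st.1.insert item (st.1.getD item 0 - 1), st.2.1.insert item (st.2.1.getD item 0 + 1),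
     st.2.2.1 + 1, st.2.2.2)
  else (st.1, st.2.1, st.2.2.1, st.2.2.2 ++ [item])

-- one step of B's rebuild loop over needed; state = (consumed, remaining)
def cStep (st : PySem.Dict String Int × List String) (item : String) :
    PySem.Dict String Int × List String :=
  if st.1.getD item 0 > 0 then (st.1.insert item (st.1.getD item 0 - 1), st.2)
  else (st.1, st.2 ++ [item])

def consume_needed_py_alt (needed : List String) (picked : List String) : Int × List String × List String :=
  let cnt := needed.foldl (fun d x => d.insert x (d.getD x 0 + 1)) PySem.Dict.empty
  let st := picked.foldl bStep (cnt, PySem.Dict.empty, 0, ([] : List String))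
  let fin := needed.foldl cStep (st.2.1, ([] : List String))
  (st.2.2.1, fin.2, st.2.2.2)

-- ===== PRECONDITION & SPEC =====
def Spec_consume_needed_py (needed : List String) (picked : List String) (out : Int × List String × List String) : Prop := out = consume_needed_py_alt needed picked
instance (needed : List String) (picked : List String) (out : Int × List String × List String) : Decidable (Spec_consume_needed_py needed picked out) := by unfold Spec_consume_needed_py; infer_instance

-- ===== CLAIM (what is proved, stated in full; the proofs are below) =====
def Claim_equal_consume_needed_py : Prop := ∀ (needed : List String) (picked : List String), Dom_consume_needed_py needed picked → Spec_consume_needed_py needed picked (consume_needed_py needed picked)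

-- ===== LEMMAS AND PROOFS =====

-- `skipF xs c` drops, for each value v, the first `c v` occurrences of v from xs
def skipF : List String → (String → Nat) → List String
  | [], _ => []
  | x :: xs, c => if c x > 0 then skipF xs (fun w => if w = x then c w - 1 else c w)
                  else x :: skipF xs c

theorem skipF_zero (xs : List String) : skipF xs (fun _ => 0) = xs := by
  induction xs with
  | nil => rfl
  | cons x xs ih => simp [skipF, ih]

theorem mem_skipF (xs : List String) (c : String → Nat) (v : String) :
    v ∈ skipF xs c ↔ c v < xs.count v := by
  induction xs generalizing c with
  | nil => simp [skipF]
  | cons x xs ih =>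
    by_cases hx : c x > 0
    · simp only [skipF, if_pos hx, ih]
      by_cases hv : v = x
      · subst hv; simp [List.count_cons_self]; omega
      · rw [List.count_cons_of_ne (fun e => hv e.symm), if_neg hv]
    · simp only [skipF, if_neg hx, List.mem_cons, ih]
      by_cases hv : v = x
      · subst hv; simp [List.count_cons_self]; omega
      · rw [List.count_cons_of_ne (fun e => hv e.symm)]; simp [hv]

theorem skipF_inc (xs : List String) (c : String → Nat) (v : String)
    (h : c v < xs.count v) :
    skipF xs (fun w => if w = v then c w + 1 else c w) = (skipF xs c).erase v := by
  induction xs generalizing c with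
  | nil => simp at h
  | cons x xs ih =>
    by_cases hv : x = v
    · subst hv
      by_cases hx : c x > 0
      · have h' : c x - 1 < xs.count x := by
          rw [List.count_cons_self] at h; omega
        have step := ih (fun w => if w = x then c w - 1 else c w) (by simpa using h')
        have e1 : (fun w => if w = x then (if w = x then c w - 1 else c w) + 1 else (if w = x then c w - 1 else c w)) = c := by
          funext w; by_cases hw : w = x <;> simp [hw]; omega
        rw [e1] at step
        have e2 : (fun w => if w = x then (if w = x then c w + 1 else c w) - 1 else (if w = x then c w + 1 else c w)) = c := by
          funext w; by_cases hw : w = x <;> simp [hw]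
        simp only [skipF, if_pos hx, if_true, Nat.zero_lt_succ, gt_iff_lt, e2]
        rw [step]
      · have e2 : (fun w => if w = x then (if w = x then c w + 1 else c w) - 1 else (if w = x then c w + 1 else c w)) = c := by
          funext w; by_cases hw : w = x <;> simp [hw]
        simp only [skipF, if_neg hx, if_true, Nat.zero_lt_succ, gt_iff_lt, e2,
          List.erase_cons_head]
    · have hcount : c v < xs.count v := by
        rwa [List.count_cons_of_ne (fun a => hv a)] at h
      have hvx : ¬ v = x := fun e => hv e.symm
      have hincx : (if x = v then c x + 1 else c x) = c x := by simp [hv]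
      by_cases hx : c x > 0
      · have ecomm : (fun w => if w = x then (if w = v then c w + 1 else c w) - 1 else (if w = v then c w + 1 else c w))
            = (fun w => if w = v then (if w = x then c w - 1 else c w) + 1 else (if w = x then c w - 1 else c w)) := by
          funext w; by_cases h1 : w = x <;> by_cases h2 : w = v
          · exact absurd (h1 ▸ h2) (by exact fun e => hv (h1 ▸ e))
          · simp [h1, hv]
          · simp [h2, hvx]
          · simp [h1, h2]
        have hc' : (if v = x then c v - 1 else c v) < xs.count v := by simp [hvx, hcount]
        simp only [skipF, gt_iff_lt, hincx, if_pos hx]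
        rw [ecomm, ih _ hc']
      · simp only [skipF, gt_iff_lt, hincx, if_neg hx]
        rw [List.erase_cons_tail (by simp [hv] : ¬ (x == v) = true), ih _ hcount]

-- B's rebuild loop over needed computes skipF of the consumed counts
theorem cFold_eq_skipF (xs : List String) (d : PySem.Dict String Int) (acc : List String)
    (hnn : ∀ v, 0 ≤ d.getD v 0) :
    (xs.foldl cStep (d, acc)).2 = acc ++ skipF xs (fun v => (d.getD v 0).toNat) := by
  induction xs generalizing d acc with
  | nil => simp [skipF]
  | cons x xs ih =>
    by_cases hx : d.getD x 0 > 0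
    · have hnn' : ∀ v, 0 ≤ (d.insert x (d.getD x 0 - 1)).getD v 0 := by
        intro v; rw [PySem.Dict.getD_insert]
        split_ifs with hv
        · omega
        · exact hnn v
      have hfun : (fun v => ((d.insert x (d.getD x 0 - 1)).getD v 0).toNat)
          = (fun w => if w = x then (d.getD w 0).toNat - 1 else (d.getD w 0).toNat) := by
        funext v; rw [PySem.Dict.getD_insert]
        split_ifs with hv
        · subst hv; omega
        · rfl
      simp only [List.foldl_cons, cStep, if_pos hx]
      rw [ih _ _ hnn', hfun]
      have : skipF (x :: xs) (fun v => (d.getD v 0).toNat)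
          = skipF xs (fun w => if w = x then (d.getD w 0).toNat - 1 else (d.getD w 0).toNat) := by
        simp only [skipF]
        rw [if_pos (by omega : (d.getD x 0).toNat > 0)]
      rw [this]
    · simp only [List.foldl_cons, cStep, if_neg hx]
      rw [ih _ _ hnn]
      have : skipF (x :: xs) (fun v => (d.getD v 0).toNat)
          = x :: skipF xs (fun v => (d.getD v 0).toNat) := by
        simp only [skipF]
        rw [if_neg (by omega : ¬ (d.getD x 0).toNat > 0)]
      rw [this]
      simp

-- B's picked loop keeps the consumed counts nonnegative
theorem bFold_consumed_nonneg (picked : List String)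
    (cnt consumed : PySem.Dict String Int) (m : Int) (exc : List String)
    (h : ∀ v, 0 ≤ consumed.getD v 0) :
    ∀ v, 0 ≤ ((picked.foldl bStep (cnt, consumed, m, exc)).2.1).getD v 0 := by
  induction picked generalizing cnt consumed m exc with
  | nil => exact h
  | cons item rest ih =>
    simp only [List.foldl_cons, bStep]
    split_ifs with hc
    · exact ih _ _ _ _ (by
        intro v; rw [PySem.Dict.getD_insert]
        split_ifs with hv
        · have := h item; omega
        · exact h v)
    · exact ih _ _ _ _ h

-- the joint invariant of A's loop and B's picked loop
theorem main_loop (needed : List String) (picked : List String) (c : String → Nat)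
    (cnt consumed : PySem.Dict String Int) (m : Int) (exc : List String)
    (hle : ∀ v, c v ≤ needed.count v)
    (hcnt : ∀ v, cnt.getD v 0 = (needed.count v : Int) - c v)
    (hcons : ∀ v, consumed.getD v 0 = (c v : Int)) :
    picked.foldl aStep (skipF needed c, exc, m)
      = (skipF needed (fun v => (((picked.foldl bStep (cnt, consumed, m, exc)).2.1).getD v 0).toNat),
         (picked.foldl bStep (cnt, consumed, m, exc)).2.2.2,
         (picked.foldl bStep (cnt, consumed, m, exc)).2.2.1) := by
  induction picked generalizing c cnt consumed m exc with
  | nil =>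
    have : (fun v => ((consumed.getD v 0)).toNat) = c := by
      funext v; rw [hcons v]; simp
    simp [this]
  | cons item rest ih =>
    have hcond : (item ∈ skipF needed c) ↔ cnt.getD item 0 > 0 := by
      rw [mem_skipF, hcnt item]
      constructor <;> intro h
      · omega
      · have := hle item; omega
    by_cases hin : item ∈ skipF needed c
    · have hlt : c item < needed.count item := (mem_skipF needed c item).1 hin
      have hrem : PySem.List.remove? (skipF needed c) item = some ((skipF needed c).erase item) :=
        PySem.List.remove?_eq_some_erase _ item hin
      simp only [List.foldl_cons, aStep, bStep, if_pos hin, if_pos (hcond.1 hin), hrem, Option.getD_some]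
      rw [← skipF_inc needed c item hlt]
      exact ih (fun w => if w = item then c w + 1 else c w)
        (cnt.insert item (cnt.getD item 0 - 1))
        (consumed.insert item (consumed.getD item 0 + 1)) (m + 1) exc
        (by intro v; by_cases hv : v = item
            · subst hv; simp; omega
            · simp [hv]; exact hle v)
        (by intro v; rw [PySem.Dict.getD_insert]; by_cases hv : v = item
            · subst hv; simp [hcnt]; ring
            · simp [hv, hcnt])
        (by intro v; rw [PySem.Dict.getD_insert]; by_cases hv : v = item
            · subst hv; simp [hcons]
            · simp [hv, hcons])
    · simp only [List.foldl_cons, aStep, bStep, if_neg hin, if_neg (fun hc => hin (hcond.2 hc))]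
      exact ih c cnt consumed m (exc ++ [item]) hle hcnt hcons

-- ===== VERDICT (by name: the statement is the Claim_ definition above) =====
theorem consume_needed_py_spec : Claim_equal_consume_needed_py := by
  intro needed picked _
  unfold Spec_consume_needed_py consume_needed_py consume_needed_py_alt
  have hcnt0 : ∀ v, (needed.foldl (fun d x => d.insert x (d.getD x 0 + 1)) PySem.Dict.empty).getD v 0
      = (needed.count v : Int) - ((fun _ => (0 : Nat)) v) := by
    intro v
    rw [PySem.Dict.getD_foldl_insert_add_one]
    simp
  have main := main_loop needed picked (fun _ => 0)
    (needed.foldl (fun d x => d.insert x (d.getD x 0 + 1)) PySem.Dict.empty)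
    PySem.Dict.empty 0 []
    (fun v => Nat.zero_le _) hcnt0 (fun v => by simp [PySem.Dict.getD_empty])
  rw [skipF_zero] at main
  have hnn := bFold_consumed_nonneg picked
    (needed.foldl (fun d x => d.insert x (d.getD x 0 + 1)) PySem.Dict.empty)
    PySem.Dict.empty 0 [] (fun v => by simp [PySem.Dict.getD_empty])
  have hfin := cFold_eq_skipF needed
    ((picked.foldl bStep (needed.foldl (fun d x => d.insert x (d.getD x 0 + 1)) PySem.Dict.empty,
      PySem.Dict.empty, 0, ([] : List String))).2.1) [] hnn
  simp only [main, hfin, List.nil_append]
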